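-- pv_equiv track=rewrite | github.com/dlg0/times-doctor | src/times_doctor/core/opt_renderer.py | extract_solver_algorithm
-- ===== SOURCE A (Python) =====
-- def extract_solver_algorithm(cplex_opt_content: str) -> dict[str, str]:
--     """Extract lpmethod and solutiontype from a cplex.opt file.
--
--     Args:
--         cplex_opt_content: Raw content of cplex.opt file
--
--     Returns:
--         Dict with 'lpmethod' and 'solutiontype' keys (empty string if not found)
--     """
--     result = {"lpmethod": "", "solutiontype": ""}
--
--     if not cplex_opt_content:
--         return result
--
--     # Parse line by line, ignoring comments
--     for line in cplex_opt_content.splitlines():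
--         # Strip inline comments (anything after $)
--         if "$" in line:
--             line = line.split("$")[0]
--
--         line = line.strip()
--         if not line or line.startswith("*"):
--             continue
--
--         # Split on whitespace to get parameter name and value
--         parts = line.split()
--         if len(parts) >= 2:
--             param_name = parts[0].lower()
--             param_value = parts[1]
--
--             if param_name == "lpmethod":
--                 result["lpmethod"] = param_value
--             elif param_name == "solutiontype":
--                 result["solutiontype"] = param_value
--
--     return result
-- ===== SOURCE B (Python) =====
-- def extract_solver_algorithm(cplex_opt_content: str) -> dict[str, str]:
--     """Extract lpmethod and solutiontype from a cplex.opt file."""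
--     if not cplex_opt_content:
--         return {"lpmethod": "", "solutiontype": ""}
--     # staged passes: clean lines, drop comments/blank lines, tokenize, keep (key, value) pairs
--     cleaned = [(ln.split("$")[0] if "$" in ln else ln).strip()
--                for ln in cplex_opt_content.splitlines()]
--     token_lists = [ln.split() for ln in cleaned if ln and not ln.startswith("*")]
--     pairs = [(ts[0].lower(), ts[1]) for ts in token_lists if len(ts) >= 2]
--     # last occurrence wins: first match scanning the pair list backwards
--     return {
--         "lpmethod": next((v for k, v in reversed(pairs) if k == "lpmethod"), ""),
--         "solutiontype": next((v for k, v in reversed(pairs) if k == "solutiontype"), ""),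
--     }
-- ===== Notes on version B (the rewrite author's own statement) =====
-- stated objective: alternative
-- what changed: A's single stateful loop with a per-parameter if/elif dispatch into a result dict is replaced by a staged pipeline (clean lines, filter, tokenize, collect all (key,value) pairs) followed by a backwards first-match search per wanted key, with no mutable result at all.
import Mathlib
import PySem

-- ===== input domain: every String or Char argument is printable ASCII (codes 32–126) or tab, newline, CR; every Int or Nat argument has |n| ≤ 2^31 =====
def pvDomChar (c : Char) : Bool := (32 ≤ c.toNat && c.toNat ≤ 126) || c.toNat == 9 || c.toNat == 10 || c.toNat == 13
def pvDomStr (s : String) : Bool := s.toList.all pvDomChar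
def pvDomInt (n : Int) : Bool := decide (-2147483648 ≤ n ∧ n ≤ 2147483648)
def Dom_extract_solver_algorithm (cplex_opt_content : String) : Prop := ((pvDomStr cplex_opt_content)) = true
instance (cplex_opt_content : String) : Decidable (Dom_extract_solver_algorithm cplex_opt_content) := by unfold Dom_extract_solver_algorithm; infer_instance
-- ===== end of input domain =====

-- B replaces A's stateful loop (per-parameter if/elif dispatch into a result dict) by a
-- staged pipeline building the list of all (key, value) pairs and a backwards first-match
-- search per wanted key; objective: alternative decomposition, same cost.

-- ===== PORT A =====
-- A's comment-strip + strip ('line.split("$")[0]' guarded by '"$" in line'; split? with a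
-- nonempty separator returns some nonempty list, so getD/headD is exact).
def pvCleanLine (line : String) : String :=
  PySem.Str.strip (if PySem.Str.isIn "$" line then ((PySem.Str.split? line "$").getD []).headD "" else line)

-- A's loop body, literally.
def pvStepA (result : PySem.Dict String String) (line : String) : PySem.Dict String String :=
  let L := pvCleanLine line
  if L = "" || PySem.Str.startswith L "*" then result
  else
    match PySem.Str.split₀ L with
    | p0 :: p1 :: _ =>
      if PySem.Str.lower p0 = "lpmethod" then PySem.Dict.insert result "lpmethod" p1
      else if PySem.Str.lower p0 = "solutiontype" then PySem.Dict.insert result "solutiontype" p1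
      else result
    | _ => result

def extract_solver_algorithm (cplex_opt_content : String) : List (String × String) :=
  if cplex_opt_content = "" then [("lpmethod", ""), ("solutiontype", "")]
  else ((PySem.Str.splitlines cplex_opt_content).foldl pvStepA
    (PySem.Dict.ofList [("lpmethod", ""), ("solutiontype", "")])).items

-- ===== PORT B =====
-- Source B's 'next((v for k, v in reversed(pairs) if k == key), "")'.
def pvLastVal (pairs : List (String × String)) (key : String) : String :=
  ((pairs.reverse.find? (fun kv => kv.1 == key)).map Prod.snd).getD ""

def extract_solver_algorithm_alt (cplex_opt_content : String) : List (String × String) :=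
  if cplex_opt_content = "" then [("lpmethod", ""), ("solutiontype", "")]
  else
    let cleaned := (PySem.Str.splitlines cplex_opt_content).map pvCleanLine
    let tokenLists := (cleaned.filter (fun ln => ln != "" && !PySem.Str.startswith ln "*")).map PySem.Str.split₀
    let pairs := tokenLists.filterMap (fun ts =>
      match ts with
      | p0 :: p1 :: _ => some (PySem.Str.lower p0, p1)
      | _ => none)
    [("lpmethod", pvLastVal pairs "lpmethod"), ("solutiontype", pvLastVal pairs "solutiontype")]

-- ===== PRECONDITION & SPEC =====
def Spec_extract_solver_algorithm (cplex_opt_content : String) (out : List (String × String)) : Prop := out = extract_solver_algorithm_alt cplex_opt_content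
instance (cplex_opt_content : String) (out : List (String × String)) : Decidable (Spec_extract_solver_algorithm cplex_opt_content out) := by unfold Spec_extract_solver_algorithm; infer_instance

-- ===== CLAIM (what is proved, stated in full; the proofs are below) =====
def Claim_equal_extract_solver_algorithm : Prop := ∀ (cplex_opt_content : String), Dom_extract_solver_algorithm cplex_opt_content → Spec_extract_solver_algorithm cplex_opt_content (extract_solver_algorithm cplex_opt_content)

-- ===== LEMMAS AND PROOFS =====
-- The (key, value) pair one cleaned line contributes, if any.
def pvPairOfClean (L : String) : Option (String × String) :=
  if L = "" || PySem.Str.startswith L "*" then none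
  else
    match PySem.Str.split₀ L with
    | p0 :: p1 :: _ => some (PySem.Str.lower p0, p1)
    | _ => none

-- The pair one raw line contributes.
def pvPairOf (line : String) : Option (String × String) := pvPairOfClean (pvCleanLine line)

-- B's value for one key, with an explicit fallback (pvLastVal pairs k = pvLastValD pairs k "").
def pvLastValD (pairs : List (String × String)) (key d : String) : String :=
  ((pairs.reverse.find? (fun kv => kv.1 == key)).map Prod.snd).getD d

lemma pvLastValD_cons (p : String × String) (rest : List (String × String)) (k d : String) :
    pvLastValD (p :: rest) k d = pvLastValD rest k (if p.1 = k then p.2 else d) := by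
  unfold pvLastValD
  rw [List.reverse_cons, List.find?_append]
  cases h : rest.reverse.find? (fun kv => kv.1 == k) with
  | some q => simp
  | none =>
    by_cases hk : p.1 = k <;> simp [hk]

lemma pvInsert_lp (a b v : String) :
    (PySem.Dict.mk [("lpmethod", a), ("solutiontype", b)]).insert "lpmethod" v
      = PySem.Dict.mk [("lpmethod", v), ("solutiontype", b)] := by
  simp [PySem.Dict.insert, PySem.Dict.contains]

lemma pvInsert_st (a b v : String) :
    (PySem.Dict.mk [("lpmethod", a), ("solutiontype", b)]).insert "solutiontype" v
      = PySem.Dict.mk [("lpmethod", a), ("solutiontype", v)] := by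
  simp [PySem.Dict.insert, PySem.Dict.contains]

-- B's staged pipeline on a list of lines collapses to one filterMap of pvPairOf.
lemma pvPipeline_eq (lines : List String) :
    ((((lines.map pvCleanLine).filter (fun ln => ln != "" && !PySem.Str.startswith ln "*")).map
        PySem.Str.split₀).filterMap (fun ts =>
          match ts with
          | p0 :: p1 :: _ => some (PySem.Str.lower p0, p1)
          | _ => none))
      = lines.filterMap pvPairOf := by
  induction lines with
  | nil => rfl
  | cons l t ih =>
    simp only [List.map_cons]
    rw [List.filterMap_cons, show pvPairOf l = pvPairOfClean (pvCleanLine l) from rfl]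
    generalize pvCleanLine l = L
    by_cases h : (L != "" && !PySem.Str.startswith L "*") = true
    · rw [List.filter_cons, if_pos h, List.map_cons, List.filterMap_cons, ih]
      have h' : ¬ (L = "" || PySem.Str.startswith L "*") = true := by
        simp at h ⊢; tauto
      unfold pvPairOfClean
      simp only [if_neg h']
    · rw [List.filter_cons, if_neg h, ih]
      have h' : (L = "" || PySem.Str.startswith L "*") = true := by
        simp at h ⊢; tauto
      unfold pvPairOfClean
      simp only [if_pos h']

-- The loop invariant: A's fold over the two-slot dict computes pvLastValD of B's pair list.
lemma pvFold_eq (lines : List String) (a b : String) :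
    lines.foldl pvStepA (PySem.Dict.mk [("lpmethod", a), ("solutiontype", b)])
      = PySem.Dict.mk
          [("lpmethod", pvLastValD (lines.filterMap pvPairOf) "lpmethod" a),
           ("solutiontype", pvLastValD (lines.filterMap pvPairOf) "solutiontype" b)] := by
  induction lines generalizing a b with
  | nil => rfl
  | cons l t ih =>
    rw [List.foldl_cons, List.filterMap_cons]
    have hstep : pvStepA (PySem.Dict.mk [("lpmethod", a), ("solutiontype", b)]) l
        = match pvPairOf l with
          | none => PySem.Dict.mk [("lpmethod", a), ("solutiontype", b)]
          | some kv => PySem.Dict.mk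
              [("lpmethod", if kv.1 = "lpmethod" then kv.2 else a),
               ("solutiontype", if kv.1 = "solutiontype" then kv.2 else b)] := by
      rw [show pvPairOf l = pvPairOfClean (pvCleanLine l) from rfl]
      unfold pvStepA pvPairOfClean
      generalize pvCleanLine l = L
      by_cases h : (L = "" || PySem.Str.startswith L "*") = true
      · simp only [if_pos h]
      · simp only [if_neg h]
        cases PySem.Str.split₀ L with
        | nil => simp
        | cons p0 rest =>
          cases rest with
          | nil => simp
          | cons p1 r2 =>
            by_cases hl : PySem.Str.lower p0 = "lpmethod"
            · simp [hl, pvInsert_lp]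
            · by_cases hs : PySem.Str.lower p0 = "solutiontype"
              · simp [hs, pvInsert_st]
              · simp [hl, hs]
    cases hp : pvPairOf l with
    | none =>
      rw [hp] at hstep
      rw [hstep, ih]
    | some kv =>
      rw [hp] at hstep
      rw [hstep, ih, pvLastValD_cons, pvLastValD_cons]

-- ===== VERDICT (by name: the statement is the Claim_ definition above) =====
theorem extract_solver_algorithm_spec : Claim_equal_extract_solver_algorithm := by
  intro s _
  unfold Spec_extract_solver_algorithm extract_solver_algorithm extract_solver_algorithm_alt
  by_cases h : s = ""
  · simp [h]
  · simp only [h, if_false]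
    show ((PySem.Str.splitlines s).foldl pvStepA (PySem.Dict.mk [("lpmethod", ""), ("solutiontype", "")])).items = _
    rw [pvFold_eq, pvPipeline_eq]
    show _ = [("lpmethod", pvLastVal ((PySem.Str.splitlines s).filterMap pvPairOf) "lpmethod"),
              ("solutiontype", pvLastVal ((PySem.Str.splitlines s).filterMap pvPairOf) "solutiontype")]
    rfl
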